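-- pv_equiv track=rewrite | github.com/Protonk/sandbox-boostrap | book/profiles/textedit/tools/02.4_pattern_extraction.py | identify_surprising_or_narrow_rules
-- ===== SOURCE A (Python) =====
-- from typing import Dict, List
--
-- def identify_surprising_or_narrow_rules(sb_text: str) -> Dict[str, object]:
--     """
--     Heuristically identify interesting or special-case rules.
--     """
--     lines = sb_text.splitlines()
--     carve_out_denies = [ln for ln in lines if "(deny" in ln and ("subpath" in ln or "regex" in ln)]
--     keychain_rules = [ln for ln in lines if "/Library/Keychains" in ln]
--     mds_rules = [ln for ln in lines if "/private/var/db/mds" in ln]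
--     appstore_rules = [ln for ln in lines if "/Library/Application Support/AppStore" in ln]
--
--     return {
--         "carve_out_denies": carve_out_denies[:10],
--         "keychain_rules": keychain_rules[:10],
--         "mds_rules": mds_rules[:10],
--         "appstore_rules": appstore_rules[:10],
--     }
-- ===== SOURCE B (Python) =====
-- def identify_surprising_or_narrow_rules(sb_text: str):
--     """Single fused pass: one loop over the lines maintaining four capped
--     buckets, breaking early once every bucket holds 10 entries."""
--     buckets = {
--         "carve_out_denies": [],
--         "keychain_rules": [],
--         "mds_rules": [],
--         "appstore_rules": [],
--     }
--     tests = [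
--         ("carve_out_denies",
--          lambda ln: "(deny" in ln and ("subpath" in ln or "regex" in ln)),
--         ("keychain_rules", lambda ln: "/Library/Keychains" in ln),
--         ("mds_rules", lambda ln: "/private/var/db/mds" in ln),
--         ("appstore_rules", lambda ln: "/Library/Application Support/AppStore" in ln),
--     ]
--     for ln in sb_text.splitlines():
--         if all(len(v) == 10 for v in buckets.values()):
--             break
--         for key, test in tests:
--             if len(buckets[key]) < 10 and test(ln):
--                 buckets[key].append(ln)
--     return buckets
-- ===== Notes on version B (the rewrite author's own statement) =====
-- stated objective: alternative
-- what changed: Replaced A's four separate full-scan list comprehensions (capped afterwards by slicing) with one fused pass over the lines that maintains four capped buckets, appends a line to every bucket whose test it matches while that bucket holds fewer than 10 entries, and breaks early once all four buckets are full.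
import Mathlib
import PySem

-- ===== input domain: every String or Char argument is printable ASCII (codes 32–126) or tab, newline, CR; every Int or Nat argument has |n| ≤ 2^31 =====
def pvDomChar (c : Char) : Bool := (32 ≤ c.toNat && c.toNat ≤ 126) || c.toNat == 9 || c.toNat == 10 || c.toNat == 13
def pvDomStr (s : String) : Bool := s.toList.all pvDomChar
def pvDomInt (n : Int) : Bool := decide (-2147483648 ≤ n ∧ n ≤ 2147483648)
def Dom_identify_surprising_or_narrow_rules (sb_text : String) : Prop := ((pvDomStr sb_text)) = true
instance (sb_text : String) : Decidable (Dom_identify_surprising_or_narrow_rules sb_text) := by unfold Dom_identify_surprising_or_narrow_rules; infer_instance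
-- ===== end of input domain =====

-- B replaces A's four full scans of the lines by one fused pass keeping four capped buckets
-- with an early break once all are full (objective: alternative decomposition).

-- ===== PORT A =====
def identify_surprising_or_narrow_rules (sb_text : String) : List (String × List String) :=
  let lines := PySem.Str.splitlines sb_text
  let carve_out_denies := lines.filter (fun ln =>
    PySem.Str.isIn "(deny" ln && (PySem.Str.isIn "subpath" ln || PySem.Str.isIn "regex" ln))
  let keychain_rules := lines.filter (fun ln => PySem.Str.isIn "/Library/Keychains" ln)
  let mds_rules := lines.filter (fun ln => PySem.Str.isIn "/private/var/db/mds" ln)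
  let appstore_rules := lines.filter (fun ln => PySem.Str.isIn "/Library/Application Support/AppStore" ln)
  [("carve_out_denies", PySem.List.slice carve_out_denies none (some 10)),
   ("keychain_rules", PySem.List.slice keychain_rules none (some 10)),
   ("mds_rules", PySem.List.slice mds_rules none (some 10)),
   ("appstore_rules", PySem.List.slice appstore_rules none (some 10))]

-- ===== PORT B =====
-- the fused loop of Source B: one pass, four buckets, append only while a bucket holds < 10,
-- early return once all four buckets hold 10
def pvAltLoop (lines : List String) (c k m a : List String) :
    List String × List String × List String × List String :=
  match lines with
  | [] => (c, k, m, a)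
  | ln :: rest =>
    if c.length == 10 && k.length == 10 && m.length == 10 && a.length == 10 then
      (c, k, m, a)
    else
      pvAltLoop rest
        (if c.length < 10 &&
            (PySem.Str.isIn "(deny" ln && (PySem.Str.isIn "subpath" ln || PySem.Str.isIn "regex" ln))
         then c ++ [ln] else c)
        (if k.length < 10 && PySem.Str.isIn "/Library/Keychains" ln then k ++ [ln] else k)
        (if m.length < 10 && PySem.Str.isIn "/private/var/db/mds" ln then m ++ [ln] else m)
        (if a.length < 10 && PySem.Str.isIn "/Library/Application Support/AppStore" ln then a ++ [ln] else a)

def identify_surprising_or_narrow_rules_alt (sb_text : String) : List (String × List String) :=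
  let r := pvAltLoop (PySem.Str.splitlines sb_text) [] [] [] []
  [("carve_out_denies", r.1), ("keychain_rules", r.2.1),
   ("mds_rules", r.2.2.1), ("appstore_rules", r.2.2.2)]

-- ===== PRECONDITION & SPEC =====
def Spec_identify_surprising_or_narrow_rules (sb_text : String) (out : List (String × List String)) : Prop := out = identify_surprising_or_narrow_rules_alt sb_text
instance (sb_text : String) (out : List (String × List String)) : Decidable (Spec_identify_surprising_or_narrow_rules sb_text out) := by unfold Spec_identify_surprising_or_narrow_rules; infer_instance

-- ===== CLAIM (what is proved, stated in full; the proofs are below) =====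
def Claim_equal_identify_surprising_or_narrow_rules : Prop := ∀ (sb_text : String), Dom_identify_surprising_or_narrow_rules sb_text → Spec_identify_surprising_or_narrow_rules sb_text (identify_surprising_or_narrow_rules sb_text)

-- ===== LEMMAS AND PROOFS =====

-- one capped-bucket step of the fused loop equals the corresponding filter step under take 10
lemma pv_bucket_step (c : List String) (ln : String) (fr : List String) (q : Bool)
    (hc : c.length ≤ 10) :
    ((if c.length < 10 && q then c ++ [ln] else c) ++ fr).take 10
      = (c ++ (if q then ln :: fr else fr)).take 10 := by
  cases q with
  | false => simp
  | true =>
    by_cases h : c.length < 10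
    · simp [h]
    · have hc10 : c.length = 10 := by omega
      simp [h, List.take_append_of_le_length (by omega : 10 ≤ c.length)]

lemma pv_slice10 {α : Type} (xs : List α) :
    PySem.List.slice xs none (some 10) = xs.take 10 := by
  have := @PySem.List.slice_to α xs 10 (by norm_num)
  simpa using this

lemma pv_bucket_len (c : List String) (ln : String) (q : Bool) (hc : c.length ≤ 10) :
    (if c.length < 10 && q then c ++ [ln] else c).length ≤ 10 := by
  split_ifs with h
  · simp only [Bool.and_eq_true, decide_eq_true_eq] at h
    simp only [List.length_append, List.length_cons, List.length_nil]
    omega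
  · exact hc

lemma pvAltLoop_eq (lines : List String) :
    ∀ (c k m a : List String), c.length ≤ 10 → k.length ≤ 10 → m.length ≤ 10 → a.length ≤ 10 →
    pvAltLoop lines c k m a =
      ((c ++ lines.filter (fun ln =>
          PySem.Str.isIn "(deny" ln && (PySem.Str.isIn "subpath" ln || PySem.Str.isIn "regex" ln))).take 10,
       (k ++ lines.filter (fun ln => PySem.Str.isIn "/Library/Keychains" ln)).take 10,
       (m ++ lines.filter (fun ln => PySem.Str.isIn "/private/var/db/mds" ln)).take 10,
       (a ++ lines.filter (fun ln => PySem.Str.isIn "/Library/Application Support/AppStore" ln)).take 10) := by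
  induction lines with
  | nil =>
    intro c k m a hc hk hm ha
    simp [pvAltLoop, List.take_of_length_le, hc, hk, hm, ha]
  | cons ln rest ih =>
    intro c k m a hc hk hm ha
    rw [pvAltLoop]
    by_cases hfull : (c.length == 10 && k.length == 10 && m.length == 10 && a.length == 10) = true
    · simp only [hfull, if_true]
      simp only [Bool.and_eq_true, beq_iff_eq] at hfull
      obtain ⟨⟨⟨hc10, hk10⟩, hm10⟩, ha10⟩ := hfull
      simp [List.take_append_of_le_length, hc10.ge, hk10.ge, hm10.ge,
            List.take_of_length_le, hc10.le, hk10.le, hm10.le, ha10.le, ha10.ge]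
    · rw [Bool.not_eq_true] at hfull
      rw [hfull]
      simp only [Bool.false_eq_true, if_false]
      rw [ih _ _ _ _ (pv_bucket_len _ _ _ hc) (pv_bucket_len _ _ _ hk)
        (pv_bucket_len _ _ _ hm) (pv_bucket_len _ _ _ ha)]
      rw [List.filter_cons, List.filter_cons, List.filter_cons, List.filter_cons]
      rw [pv_bucket_step _ _ _ _ hc, pv_bucket_step _ _ _ _ hk,
          pv_bucket_step _ _ _ _ hm, pv_bucket_step _ _ _ _ ha]

-- ===== VERDICT (by name: the statement is the Claim_ definition above) =====
theorem identify_surprising_or_narrow_rules_spec : Claim_equal_identify_surprising_or_narrow_rules := by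
  intro sb_text _
  unfold Spec_identify_surprising_or_narrow_rules
  unfold identify_surprising_or_narrow_rules identify_surprising_or_narrow_rules_alt
  rw [pvAltLoop_eq _ [] [] [] [] (by simp) (by simp) (by simp) (by simp)]
  simp only [pv_slice10, List.nil_append]
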